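-- pv_equiv track=rewrite | github.com/FenixAlive/sisIntel3 | funciones_activacion.py | signo
-- ===== SOURCE A (Python) =====
-- def signo(x):
--     res = []
--     for v in x:
--         if v < 0:
--             res.append(-1)
--         elif v > 0:
--             res.append(1)
--         else:
--             res.append(0)
--     return res
-- ===== SOURCE B (Python) =====
-- def signo(x):
--     pos = [v > 0 for v in x]
--     neg = [v < 0 for v in x]
--     return [int(p) - int(n) for p, n in zip(pos, neg)]
-- ===== Notes on version B (the rewrite author's own statement) =====
-- stated objective: alternative
-- what changed: Replaces the single accumulator loop with an if/elif/else cascade by three staged passes: two boolean comparison lists (v>0, v<0) built first, then zipped and combined branchlessly as int(p)-int(n).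
import Mathlib
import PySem

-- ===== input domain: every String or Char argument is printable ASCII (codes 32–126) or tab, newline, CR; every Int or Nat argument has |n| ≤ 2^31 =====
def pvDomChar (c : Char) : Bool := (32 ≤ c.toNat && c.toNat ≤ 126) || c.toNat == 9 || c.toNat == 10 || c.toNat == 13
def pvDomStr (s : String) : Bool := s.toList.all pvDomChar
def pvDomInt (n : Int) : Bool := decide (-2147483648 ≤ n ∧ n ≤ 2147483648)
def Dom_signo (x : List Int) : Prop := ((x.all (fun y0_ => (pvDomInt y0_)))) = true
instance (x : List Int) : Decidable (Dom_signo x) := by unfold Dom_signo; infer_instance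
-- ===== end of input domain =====

-- B replaces the one-pass if/elif/else accumulator loop by three staged passes: two boolean
-- comparison lists built first, then zipped and combined branchlessly; objective: alternative.
-- ===== PORT A =====
def signo (x : List Int) : List Int :=
  x.foldl (fun res v =>
    if v < 0 then res ++ [-1]
    else if v > 0 then res ++ [1]
    else res ++ [0]) []

-- ===== PORT B =====
def signo_alt (x : List Int) : List Int :=
  let pos := x.map (fun v => decide (v > 0))
  let neg := x.map (fun v => decide (v < 0))
  (pos.zip neg).map (fun pn => (if pn.1 then (1:Int) else 0) - (if pn.2 then 1 else 0))

-- ===== PRECONDITION & SPEC =====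
def Spec_signo (x : List Int) (out : List Int) : Prop := out = signo_alt x
instance (x : List Int) (out : List Int) : Decidable (Spec_signo x out) := by unfold Spec_signo; infer_instance

-- ===== CLAIM (what is proved, stated in full; the proofs are below) =====
def Claim_equal_signo : Prop := ∀ (x : List Int), Dom_signo x → Spec_signo x (signo x)

-- ===== LEMMAS AND PROOFS =====
theorem signo_alt_cons (v : Int) (t : List Int) :
    signo_alt (v :: t) =
      ((if v > 0 then (1:Int) else 0) - (if v < 0 then 1 else 0)) :: signo_alt t := by
  simp [signo_alt]

theorem signo_foldl (x : List Int) (acc : List Int) :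
    x.foldl (fun res v =>
      if v < 0 then res ++ [-1]
      else if v > 0 then res ++ [1]
      else res ++ [0]) acc = acc ++ signo_alt x := by
  induction x generalizing acc with
  | nil => simp [signo_alt]
  | cons h t ih =>
    simp only [List.foldl]
    rw [signo_alt_cons]
    rw [ih]
    split_ifs with h1 h2 <;> simp <;> omega

-- ===== VERDICT (by name: the statement is the Claim_ definition above) =====
theorem signo_spec : Claim_equal_signo := by
  intro x _
  unfold Spec_signo signo
  rw [signo_foldl]
  simp
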